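-- pv_equiv track=rewrite | github.com/changhae89/costview_LLM | backend/api/routes/mobile.py | _nth_non_null_row
-- ===== SOURCE A (Python) =====
-- def _nth_non_null_row(rows: list[dict], key: str, nth: int = 0) -> dict | None:
--     seen = 0
--     for row in reversed(rows):
--         value = row.get(key)
--         if value is None or value == "":
--             continue
--         if seen == nth:
--             return row
--         seen += 1
--     return None
-- ===== SOURCE B (Python) =====
-- def _nth_non_null_row(rows: list[dict], key: str, nth: int = 0) -> dict | None:
--     filtered = [r for r in rows if r.get(key) is not None and r.get(key) != ""]
--     if 0 <= nth < len(filtered):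
--         return filtered[-(nth + 1)]
--     return None
-- ===== Notes on version B (the rewrite author's own statement) =====
-- stated objective: simpler
-- what changed: Replaces A's interleaved reverse scan with a counter and early exit by a two-phase build-then-index: filter the non-null rows once in order, then return the nth-from-end element by negative indexing (guarding negative nth).
import Mathlib
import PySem

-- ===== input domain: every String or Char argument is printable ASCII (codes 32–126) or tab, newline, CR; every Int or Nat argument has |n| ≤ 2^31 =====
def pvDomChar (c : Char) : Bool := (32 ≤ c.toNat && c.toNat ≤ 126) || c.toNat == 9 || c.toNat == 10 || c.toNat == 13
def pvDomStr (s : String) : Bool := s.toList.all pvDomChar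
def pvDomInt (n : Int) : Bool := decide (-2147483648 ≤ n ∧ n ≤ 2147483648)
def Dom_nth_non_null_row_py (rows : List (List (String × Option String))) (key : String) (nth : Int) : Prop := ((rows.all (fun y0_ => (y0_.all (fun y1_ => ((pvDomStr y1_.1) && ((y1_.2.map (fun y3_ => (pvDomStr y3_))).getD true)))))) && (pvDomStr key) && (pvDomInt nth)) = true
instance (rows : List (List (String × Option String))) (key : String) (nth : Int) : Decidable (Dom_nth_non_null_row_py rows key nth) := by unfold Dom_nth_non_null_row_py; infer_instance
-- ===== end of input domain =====

-- B replaces A's interleaved reverse scan (counter + early exit) with a two-phase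
-- build-then-index: filter the non-null rows once, then negative-index the result. Objective: simpler.

-- ===== PORT A =====
-- A's loop over reversed(rows) carrying the 'seen' counter, branches in source order.
def pvLoopA (key : String) (nth : Int) :
    List (List (String × Option String)) → Int → Option (List (String × Option String))
  | [], _ => none
  | r :: rest, seen =>
    let value := (PySem.Dict.get? (PySem.Dict.mk r) key).join   -- row.get(key): missing key → None
    if value = none ∨ value = some "" then pvLoopA key nth rest seen
    else if seen = nth then some r
    else pvLoopA key nth rest (seen + 1)

def nth_non_null_row_py (rows : List (List (String × Option String))) (key : String) (nth : Int) : Option (List (String × Option String)) :=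
  pvLoopA key nth rows.reverse 0

-- ===== PORT B =====
def pvKeepB (key : String) (r : List (String × Option String)) : Bool :=
  (PySem.Dict.get? (PySem.Dict.mk r) key).join != none && (PySem.Dict.get? (PySem.Dict.mk r) key).join != some ""

def nth_non_null_row_py_alt (rows : List (List (String × Option String))) (key : String) (nth : Int) : Option (List (String × Option String)) :=
  let filtered := rows.filter (pvKeepB key)
  if 0 ≤ nth ∧ nth < (filtered.length : Int) then
    PySem.List.pyGet? filtered (-(nth + 1))
  else none

-- ===== PRECONDITION & SPEC =====
def Spec_nth_non_null_row_py (rows : List (List (String × Option String))) (key : String) (nth : Int) (out : Option (List (String × Option String))) : Prop := out = nth_non_null_row_py_alt rows key nth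
instance (rows : List (List (String × Option String))) (key : String) (nth : Int) (out : Option (List (String × Option String))) : Decidable (Spec_nth_non_null_row_py rows key nth out) := by unfold Spec_nth_non_null_row_py; infer_instance

-- ===== CLAIM (what is proved, stated in full; the proofs are below) =====
def Claim_equal_nth_non_null_row_py : Prop := ∀ (rows : List (List (String × Option String))) (key : String) (nth : Int), Dom_nth_non_null_row_py rows key nth → Spec_nth_non_null_row_py rows key nth (nth_non_null_row_py rows key nth)

-- ===== LEMMAS AND PROOFS =====

-- A's loop on a list with counter `seen` returns the (nth - seen)-th kept element.
lemma pvLoopA_eq (key : String) (nth : Int) (l : List (List (String × Option String))) :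
    ∀ seen : Int, pvLoopA key nth l seen =
      if 0 ≤ nth - seen then (l.filter (pvKeepB key))[(nth - seen).toNat]? else none := by
  induction l with
  | nil => intro seen; simp [pvLoopA]
  | cons r rest ih =>
    intro seen
    by_cases hk : pvKeepB key r = true
    · have hcond : ¬ ((PySem.Dict.get? (PySem.Dict.mk r) key).join = none ∨ (PySem.Dict.get? (PySem.Dict.mk r) key).join = some "") := by
        simp [pvKeepB] at hk; tauto
      simp only [pvLoopA, List.filter_cons, hk, hcond, if_false]
      by_cases hs : seen = nth
      · subst hs; simp
      · rw [if_neg hs, ih (seen + 1)]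
        by_cases h0 : 0 ≤ nth - seen
        · rw [if_pos h0]
          have h0' : (0:Int) < nth - seen := by omega
          rw [if_pos (by omega : (0:Int) ≤ nth - (seen + 1))]
          have : (nth - seen).toNat = (nth - (seen + 1)).toNat + 1 := by omega
          rw [this]; simp
        · rw [if_neg h0, if_neg (by omega)]
    · have hcond : ((PySem.Dict.get? (PySem.Dict.mk r) key).join = none ∨ (PySem.Dict.get? (PySem.Dict.mk r) key).join = some "") := by
        simp [pvKeepB] at hk
        by_cases h1 : (PySem.Dict.get? (PySem.Dict.mk r) key).join = none
        · left; exact h1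
        · right; exact hk h1
      simp only [pvLoopA, if_pos hcond, List.filter_cons, hk]
      simp only [Bool.false_eq_true, if_false]
      exact ih seen

-- ===== VERDICT (by name: the statement is the Claim_ definition above) =====
theorem nth_non_null_row_py_spec : Claim_equal_nth_non_null_row_py := by
  intro rows key nth _
  unfold Spec_nth_non_null_row_py nth_non_null_row_py nth_non_null_row_py_alt
  rw [pvLoopA_eq]
  simp only [sub_zero, List.filter_reverse]
  set f := rows.filter (pvKeepB key) with hf
  by_cases h0 : 0 ≤ nth
  · rw [if_pos h0]
    by_cases hlt : nth < (f.length : Int)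
    · rw [if_pos ⟨h0, hlt⟩]
      have hlt' : nth.toNat < f.length := by omega
      rw [List.getElem?_reverse (by simpa using hlt')]
      rw [show (-(nth + 1)) = -(((nth.toNat + 1 : Nat) : Int)) by omega]
      rw [PySem.List.pyGet?_neg_natCast f (nth.toNat + 1) (by omega) (by omega)]
      congr 1
      omega
    · rw [if_neg (by tauto)]
      apply List.getElem?_eq_none
      simp; omega
  · rw [if_neg h0, if_neg (by tauto)]
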